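-- pv_equiv track=rewrite | github.com/k-roy/TRACE | trace_crispr/preprocessing/detection.py | _find_read_start_positions
-- ===== SOURCE A (Python) =====
-- from typing import Dict, List, Optional, Tuple
--
-- def _find_read_start_positions(
--     reads: List[str],
--     reference: str,
--     kmer_size: int = 15
-- ) -> List[int]:
--     """
--     Find where each read aligns to the reference using k-mer matching.
--
--     Tries multiple k-mer positions in each read to handle UMI prefixes and
--     other artifacts at read starts.
--
--     Args:
--         reads: List of read sequences
--         reference: Reference sequence
--         kmer_size: Size of k-mer to use for matching
--
--     Returns:
--         List of start positions (0-indexed) for reads that could be aligned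
--     """
--     ref_upper = reference.upper()
--     ref_rc = _reverse_complement(ref_upper)
--
--     # Build k-mer index of reference (both strands)
--     ref_kmers: Dict[str, List[Tuple[int, bool]]] = {}  # kmer -> [(pos, is_rc), ...]
--     for i in range(len(ref_upper) - kmer_size + 1):
--         kmer = ref_upper[i:i + kmer_size]
--         if kmer not in ref_kmers:
--             ref_kmers[kmer] = []
--         ref_kmers[kmer].append((i, False))  # Forward strand
--
--     # Also index reverse complement
--     for i in range(len(ref_rc) - kmer_size + 1):
--         kmer = ref_rc[i:i + kmer_size]
--         if kmer not in ref_kmers: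
--             ref_kmers[kmer] = []
--         # Position on original forward strand
--         fwd_pos = len(ref_upper) - i - kmer_size
--         ref_kmers[kmer].append((fwd_pos, True))  # RC strand
--
--     # Find start positions for each read
--     # Search comprehensively: check every position from 0-60 to handle both:
--     # - TruSeq with UMIs (typically at fixed offsets like 0, 6, 8)
--     # - Tn5 without UMIs (match can be at any offset due to adapter trimming)
--     start_positions = []
--     max_offset = 60
--
--     for read in reads:
--         if len(read) < kmer_size + 20:
--             continue
--
--         # Check every position from 0 to max_offset for comprehensive coverage
--         for offset in range(0, min(max_offset, len(read) - kmer_size)):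
--             read_kmer = read[offset:offset + kmer_size].upper()
--             if read_kmer in ref_kmers:
--                 # Found a match - calculate the read start position
--                 ref_pos, is_rc = ref_kmers[read_kmer][0]
--                 if is_rc:
--                     # For RC alignment, the read start is at ref_pos + kmer_size - offset
--                     # adjusted for reverse direction
--                     read_start = ref_pos - offset
--                 else:
--                     # For forward alignment, subtract the offset
--                     read_start = ref_pos - offset
--
--                 if 0 <= read_start < len(ref_upper):
--                     start_positions.append(read_start)
--                     break
--
--     return start_positions
--
-- def _reverse_complement(seq: str) -> str:
--     """Return reverse complement of DNA sequence."""
--     complement = {'A': 'T', 'T': 'A', 'G': 'C', 'C': 'G', 'N': 'N'}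
--     return ''.join(complement.get(b, 'N') for b in reversed(seq.upper()))
-- ===== SOURCE B (Python) =====
-- def _find_read_start_positions(reads, reference, kmer_size=15):
--     """Find where each read aligns to the reference by direct substring search
--     (forward strand first, then reverse complement), without a k-mer index."""
--     ref_upper = reference.upper()
--     ref_rc = _reverse_complement(ref_upper)
--     n = len(ref_upper)
--
--     start_positions = []
--     for read in reads:
--         if len(read) < kmer_size + 20:
--             continue
--         for offset in range(0, min(60, len(read) - kmer_size)):
--             read_kmer = read[offset:offset + kmer_size].upper()
--             pos = ref_upper.find(read_kmer)
--             if pos < 0: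
--                 rc_pos = ref_rc.find(read_kmer)
--                 if rc_pos < 0:
--                     continue
--                 pos = n - rc_pos - kmer_size
--             read_start = pos - offset
--             if 0 <= read_start < n:
--                 start_positions.append(read_start)
--                 break
--     return start_positions
--
--
-- def _reverse_complement(seq):
--     complement = {'A': 'T', 'T': 'A', 'G': 'C', 'C': 'G', 'N': 'N'}
--     return ''.join(complement.get(b, 'N') for b in reversed(seq.upper()))
-- ===== Notes on version B (the rewrite author's own statement) =====
-- stated objective: simpler
-- what changed: B drops A's precomputed two-strand k-mer dictionary and aligns each read by direct substring search (forward-strand str.find first, then reverse-complement str.find, converting the RC hit back to a forward position); Pre_ restricts to nonnegative kmer_size, the natural domain of a k-mer size, outside which the slices no longer denote k-mers and the programs are not required to agree.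
-- outside the precondition, e.g. on _find_read_start_positions(['AAAAAAAAAAAAAAAAAAAAA'], 'AC', -1): A returns [0], B returns []
import Mathlib
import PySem

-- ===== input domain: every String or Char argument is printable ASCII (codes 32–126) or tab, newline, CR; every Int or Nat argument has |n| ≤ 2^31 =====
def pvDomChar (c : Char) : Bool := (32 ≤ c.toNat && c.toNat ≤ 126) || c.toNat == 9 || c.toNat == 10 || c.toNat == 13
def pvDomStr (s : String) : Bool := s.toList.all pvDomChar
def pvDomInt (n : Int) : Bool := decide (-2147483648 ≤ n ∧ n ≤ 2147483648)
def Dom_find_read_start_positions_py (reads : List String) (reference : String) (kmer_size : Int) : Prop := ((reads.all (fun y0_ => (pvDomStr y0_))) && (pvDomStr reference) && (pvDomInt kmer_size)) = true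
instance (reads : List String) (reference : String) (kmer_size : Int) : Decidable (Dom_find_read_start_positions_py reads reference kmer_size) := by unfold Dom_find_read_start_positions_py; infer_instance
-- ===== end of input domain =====

-- B drops A's precomputed k-mer index and aligns each read by direct substring search
-- (forward-strand find first, then reverse-complement find) — objective: simpler.


-- ===== PORT A =====
-- _reverse_complement (shared helper of both Python sources, character-for-character)
def pvRevComp (seq : List Char) : List Char :=
  let complement : PySem.Dict Char Char :=
    PySem.Dict.ofList [('A','T'),('T','A'),('G','C'),('C','G'),('N','N')]
  (PySem.Chars.upper seq).reverse.map (fun b => complement.getD b 'N')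

-- A's two index-building loops (kmer -> [(pos, is_rc), ...])
def pvBuildKmers (refU refRC : List Char) (k : Int) : PySem.Dict (List Char) (List (Int × Bool)) :=
  let n : Int := refU.length
  let d0 := (PySem.List.pyRange 0 (n - k + 1) 1).foldl (fun d i =>
      let kmer := PySem.List.slice refU (some i) (some (i + k))
      let d := if d.contains kmer then d else d.insert kmer []
      d.modify kmer [] (fun l => l ++ [(i, false)])) PySem.Dict.empty
  (PySem.List.pyRange 0 ((refRC.length : Int) - k + 1) 1).foldl (fun d i =>
      let kmer := PySem.List.slice refRC (some i) (some (i + k))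
      let d := if d.contains kmer then d else d.insert kmer []
      let fwd_pos := n - i - k
      d.modify kmer [] (fun l => l ++ [(fwd_pos, true)])) d0

-- A's inner offset loop (for offset in range(...): ... break) as structural recursion
def pvAScan (d : PySem.Dict (List Char) (List (Int × Bool))) (n k : Int) (r : List Char) :
    List Int → Option Int
  | [] => none
  | offset :: rest =>
      let read_kmer := PySem.Chars.upper (PySem.List.slice r (some offset) (some (offset + k)))
      if d.contains read_kmer then
        let p := PySem.List.pyGetD (d.getD read_kmer []) 0 ((0 : Int), false)
        let read_start := if p.2 then p.1 - offset else p.1 - offset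
        if 0 ≤ read_start ∧ read_start < n then some read_start
        else pvAScan d n k r rest
      else pvAScan d n k r rest

def find_read_start_positions_py (reads : List String) (reference : String) (kmer_size : Int) : List Int :=
  let ref_upper := PySem.Chars.upper reference.toList
  let ref_rc := pvRevComp ref_upper
  let ref_kmers := pvBuildKmers ref_upper ref_rc kmer_size
  reads.foldl (fun acc read =>
    if ((read.toList.length : Int)) < kmer_size + 20 then acc
    else
      match pvAScan ref_kmers (ref_upper.length : Int) kmer_size read.toList
          (PySem.List.pyRange 0 (min 60 ((read.toList.length : Int) - kmer_size)) 1) with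
      | some s => acc ++ [s]
      | none => acc) []

-- ===== PORT B =====
-- B's inner offset loop: forward find, then reverse-complement find, no index
def pvBScan (refU refRC : List Char) (n k : Int) (r : List Char) : List Int → Option Int
  | [] => none
  | offset :: rest =>
      let read_kmer := PySem.Chars.upper (PySem.List.slice r (some offset) (some (offset + k)))
      let pos := PySem.Chars.find refU read_kmer
      if pos < 0 then
        let rc_pos := PySem.Chars.find refRC read_kmer
        if rc_pos < 0 then pvBScan refU refRC n k r rest
        else
          let pos := n - rc_pos - k
          let read_start := pos - offset
          if 0 ≤ read_start ∧ read_start < n then some read_start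
          else pvBScan refU refRC n k r rest
      else
        let read_start := pos - offset
        if 0 ≤ read_start ∧ read_start < n then some read_start
        else pvBScan refU refRC n k r rest

def find_read_start_positions_py_alt (reads : List String) (reference : String) (kmer_size : Int) : List Int :=
  let ref_upper := PySem.Chars.upper reference.toList
  let ref_rc := pvRevComp ref_upper
  let n : Int := ref_upper.length
  reads.foldl (fun acc read =>
    if ((read.toList.length : Int)) < kmer_size + 20 then acc
    else
      match pvBScan ref_upper ref_rc n kmer_size read.toList
          (PySem.List.pyRange 0 (min 60 ((read.toList.length : Int) - kmer_size)) 1) with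
      | some s => acc ++ [s]
      | none => acc) []

-- ===== PRECONDITION & SPEC =====
-- Pre_ restricts to nonnegative k-mer sizes, the function's natural domain (a k-mer size is a
-- length): nothing is claimed for negative kmer_size, where the Python slices read[offset:offset+kmer_size]
-- no longer denote k-mers and the two programs are not required to agree.
def Pre_find_read_start_positions_py (reads : List String) (reference : String) (kmer_size : Int) : Prop :=
  0 ≤ kmer_size
instance (reads : List String) (reference : String) (kmer_size : Int) : Decidable (Pre_find_read_start_positions_py reads reference kmer_size) := by unfold Pre_find_read_start_positions_py; infer_instance
def pvWitness_find_read_start_positions_py : List String × String × Int :=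
  (["ACGTACGTNNACGTACGTACGTACG"], "ACGTACGTNNACGTACGT", 4)

def Spec_find_read_start_positions_py (reads : List String) (reference : String) (kmer_size : Int) (out : List Int) : Prop := out = find_read_start_positions_py_alt reads reference kmer_size
instance (reads : List String) (reference : String) (kmer_size : Int) (out : List Int) : Decidable (Spec_find_read_start_positions_py reads reference kmer_size out) := by unfold Spec_find_read_start_positions_py; infer_instance

-- ===== CLAIM (what is proved, stated in full; the proofs are below) =====
def Claim_equal_find_read_start_positions_py : Prop := ∀ (reads : List String) (reference : String) (kmer_size : Int), Dom_find_read_start_positions_py reads reference kmer_size → Pre_find_read_start_positions_py reads reference kmer_size → Spec_find_read_start_positions_py reads reference kmer_size (find_read_start_positions_py reads reference kmer_size)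

-- ===== LEMMAS AND PROOFS =====

-- the forward- and RC-strand (kmer, payload) streams A's two loops feed into the dict
def pvPairsF (refU : List Char) (k : Int) : List (List Char × (Int × Bool)) :=
  (PySem.List.pyRange 0 ((refU.length : Int) - k + 1) 1).map
    (fun i => (PySem.List.slice refU (some i) (some (i + k)), (i, false)))
def pvPairsR (refU refRC : List Char) (k : Int) : List (List Char × (Int × Bool)) :=
  (PySem.List.pyRange 0 ((refRC.length : Int) - k + 1) 1).map
    (fun i => (PySem.List.slice refRC (some i) (some (i + k)), ((refU.length : Int) - i - k, true)))

-- "if kmer not in d: d[kmer] = []" followed by append collapses to a bare modify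
theorem pv_collapse (d : PySem.Dict (List Char) (List (Int × Bool))) (key : List Char)
    (f : List (Int × Bool) → List (Int × Bool)) :
    (if d.contains key then d else d.insert key []).modify key [] f = d.modify key [] f := by
  by_cases h : d.contains key = true
  · simp [h]
  · simp only [Bool.not_eq_true] at h
    simp [h, PySem.Dict.modify, PySem.Dict.getD_insert_self, PySem.Dict.insert_insert_self,
      PySem.Dict.getD_of_not_contains _ _ h]

theorem pv_build_eq (refU refRC : List Char) (k : Int) :
    pvBuildKmers refU refRC k =
      (pvPairsF refU k ++ pvPairsR refU refRC k).foldl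
        (fun d p => d.modify p.1 [] (fun l => l ++ [p.2])) PySem.Dict.empty := by
  unfold pvBuildKmers pvPairsF pvPairsR
  simp only [List.foldl_append, List.foldl_map, pv_collapse]

theorem pv_getD_fold (l : List (List Char × (Int × Bool))) (s : List Char) :
    (l.foldl (fun d p => d.modify p.1 [] (fun l => l ++ [p.2])) PySem.Dict.empty).getD s [] =
      (l.filter (fun p => p.1 == s)).map (·.2) := by
  rw [PySem.Dict.getD_foldl_modify_append]
  simp [PySem.Dict.getD_empty]

theorem pv_contains_fold (l : List (List Char × (Int × Bool))) (s : List Char) :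
    (l.foldl (fun d p => d.modify p.1 [] (fun l => l ++ [p.2])) PySem.Dict.empty).contains s = true ↔
      s ∈ l.map (·.1) := by
  rw [PySem.Dict.contains_iff_mem_keys]
  rw [show (fun (d : PySem.Dict (List Char) (List (Int × Bool))) (p : List Char × (Int × Bool)) =>
        d.modify p.1 [] (fun l => l ++ [p.2])) = fun d p => d.modify ((·.1) p) []
        ((fun (_ : PySem.Dict (List Char) (List (Int × Bool))) (p : List Char × (Int × Bool))
          (l : List (Int × Bool)) => l ++ [p.2]) d p) from rfl]
  rw [PySem.Dict.keys_foldl_modify_key]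
  simp [PySem.Dict.keys_empty]

theorem pv_ne_nil_iff (l : List (List Char × (Int × Bool))) (s : List Char) :
    s ∈ l.map (·.1) ↔ l.filter (fun p => p.1 == s) ≠ []  := by
  rw [Ne, List.filter_eq_nil_iff]
  push Not
  simp [List.mem_map]

theorem pv_contains_build (refU refRC : List Char) (k : Int) (s : List Char) :
    (pvBuildKmers refU refRC k).contains s = true ↔
      ((pvPairsF refU k).filter (fun p => p.1 == s) ≠ [] ∨
       (pvPairsR refU refRC k).filter (fun p => p.1 == s) ≠ []) := by
  rw [pv_build_eq, pv_contains_fold, List.map_append, List.mem_append,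
    pv_ne_nil_iff, pv_ne_nil_iff]

theorem pv_getD_build (refU refRC : List Char) (k : Int) (s : List Char) :
    (pvBuildKmers refU refRC k).getD s [] =
      ((pvPairsF refU k).filter (fun p => p.1 == s)).map (·.2) ++
      ((pvPairsR refU refRC k).filter (fun p => p.1 == s)).map (·.2) := by
  rw [pv_build_eq, pv_getD_fold, List.filter_append, List.map_append]

-- a length-k slice equals s iff s is a prefix of the corresponding drop
theorem pv_occ_iff (cs s : List Char) (k i : Int) (hk : 0 ≤ k) (hs : (s.length : Int) = k)
    (hi : 0 ≤ i) :
    PySem.List.slice cs (some i) (some (i + k)) = s ↔ s <+: cs.drop i.toNat := by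
  rw [PySem.List.slice_toNat cs hi (by omega)]
  have hkn : (i + k).toNat - i.toNat = s.length := by omega
  rw [hkn]
  constructor
  · intro h; rw [List.prefix_iff_eq_take]; exact h.symm
  · intro h; rw [List.prefix_iff_eq_take] at h; exact h.symm

-- no occurrence: the filtered index list is empty iff .find comes back -1
theorem pv_filter_nil (cs s : List Char) (k : Int) (hk : 0 ≤ k) (hs : (s.length : Int) = k)
    (h : PySem.Chars.find cs s < 0) :
    ((PySem.List.pyRange 0 ((cs.length : Int) - k + 1) 1).filter
      (fun i => PySem.List.slice cs (some i) (some (i + k)) == s)) = [] := by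
  have hne : PySem.Chars.find cs s = -1 := by
    have := PySem.Chars.neg_one_le_find cs s; omega
  rw [PySem.Chars.find_eq_neg_one_iff] at hne
  have hnotin : PySem.Chars.isIn s cs = false := by
    rw [PySem.Chars.isIn_eq_false_iff]; exact hne
  rw [List.filter_eq_nil_iff]
  intro i hi
  rw [PySem.List.mem_pyRange_one] at hi
  simp only [beq_iff_eq]
  rw [pv_occ_iff cs s k i hk hs hi.1]
  intro hpre
  have : ∃ j, s <+: cs.drop j := ⟨i.toNat, hpre⟩
  rw [PySem.Chars.exists_prefix_drop_iff_isIn] at this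
  rw [this] at hnotin; exact Bool.noConfusion hnotin

-- first occurrence: the filtered index list starts with exactly .find's result
theorem pv_filter_head (cs s : List Char) (k : Int) (hk : 0 ≤ k) (hs : (s.length : Int) = k)
    (h : ¬ PySem.Chars.find cs s < 0) :
    ∃ t, ((PySem.List.pyRange 0 ((cs.length : Int) - k + 1) 1).filter
      (fun i => PySem.List.slice cs (some i) (some (i + k)) == s)) = PySem.Chars.find cs s :: t := by
  have h0 : 0 ≤ PySem.Chars.find cs s := by omega
  obtain ⟨hpre, hmin⟩ := PySem.Chars.find_spec (s := cs) (sub := s) h0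
  set j : Int := PySem.Chars.find cs s with hj
  have hlen : s.length ≤ (cs.drop j.toNat).length := hpre.length_le
  have hfl := PySem.Chars.find_le_length cs s
  have hjle : j ≤ (cs.length : Int) - k := by
    simp [List.length_drop] at hlen; omega
  have hsplit := PySem.List.pyRange_one_append 0 j ((cs.length : Int) - k + 1) h0 (by omega)
  rw [hsplit, List.filter_append]
  have h1 : ((PySem.List.pyRange 0 j 1).filter
      (fun i => PySem.List.slice cs (some i) (some (i + k)) == s)) = [] := by
    rw [List.filter_eq_nil_iff]
    intro i hi
    rw [PySem.List.mem_pyRange_one] at hi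
    simp only [beq_iff_eq]
    rw [pv_occ_iff cs s k i hk hs hi.1]
    exact hmin i.toNat (by omega)
  rw [h1, List.nil_append]
  rw [PySem.List.pyRange_one_cons (by omega)]
  rw [List.filter_cons_of_pos (by
    simp only [beq_iff_eq]
    rw [pv_occ_iff cs s k j hk hs h0]; exact hpre)]
  exact ⟨_, rfl⟩

theorem pv_filterF_head (refU : List Char) (k : Int) (s : List Char) (hk : 0 ≤ k)
    (hs : (s.length : Int) = k) (h : ¬ PySem.Chars.find refU s < 0) :
    ∃ t, (pvPairsF refU k).filter (fun p => p.1 == s) =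
      (PySem.List.slice refU (some (PySem.Chars.find refU s))
        (some (PySem.Chars.find refU s + k)), (PySem.Chars.find refU s, false)) :: t := by
  obtain ⟨t, ht⟩ := pv_filter_head refU s k hk hs h
  unfold pvPairsF
  rw [List.filter_map]
  rw [show ((fun p => p.1 == s) ∘ fun i =>
      (PySem.List.slice refU (some i) (some (i + k)), (i, false))) =
      fun i => PySem.List.slice refU (some i) (some (i + k)) == s from rfl]
  rw [ht, List.map_cons]
  exact ⟨_, rfl⟩

theorem pv_filterR_head (refU refRC : List Char) (k : Int) (s : List Char) (hk : 0 ≤ k)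
    (hs : (s.length : Int) = k) (h : ¬ PySem.Chars.find refRC s < 0) :
    ∃ t, (pvPairsR refU refRC k).filter (fun p => p.1 == s) =
      (PySem.List.slice refRC (some (PySem.Chars.find refRC s))
        (some (PySem.Chars.find refRC s + k)),
       ((refU.length : Int) - PySem.Chars.find refRC s - k, true)) :: t := by
  obtain ⟨t, ht⟩ := pv_filter_head refRC s k hk hs h
  unfold pvPairsR
  rw [List.filter_map]
  rw [show ((fun p => p.1 == s) ∘ fun i =>
      (PySem.List.slice refRC (some i) (some (i + k)),
        ((refU.length : Int) - i - k, true))) =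
      fun i => PySem.List.slice refRC (some i) (some (i + k)) == s from rfl]
  rw [ht, List.map_cons]
  exact ⟨_, rfl⟩

theorem pv_filterF_nil (refU : List Char) (k : Int) (s : List Char) (hk : 0 ≤ k)
    (hs : (s.length : Int) = k) (h : PySem.Chars.find refU s < 0) :
    (pvPairsF refU k).filter (fun p => p.1 == s) = [] := by
  unfold pvPairsF
  rw [List.filter_map]
  rw [show ((fun p => p.1 == s) ∘ fun i =>
      (PySem.List.slice refU (some i) (some (i + k)), (i, false))) =
      fun i => PySem.List.slice refU (some i) (some (i + k)) == s from rfl]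
  rw [pv_filter_nil refU s k hk hs h, List.map_nil]

theorem pv_filterR_nil (refU refRC : List Char) (k : Int) (s : List Char) (hk : 0 ≤ k)
    (hs : (s.length : Int) = k) (h : PySem.Chars.find refRC s < 0) :
    (pvPairsR refU refRC k).filter (fun p => p.1 == s) = [] := by
  unfold pvPairsR
  rw [List.filter_map]
  rw [show ((fun p => p.1 == s) ∘ fun i =>
      (PySem.List.slice refRC (some i) (some (i + k)),
        ((refU.length : Int) - i - k, true))) =
      fun i => PySem.List.slice refRC (some i) (some (i + k)) == s from rfl]
  rw [pv_filter_nil refRC s k hk hs h, List.map_nil]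

theorem pv_scan_eq (refU refRC r : List Char) (k : Int) (hk : 0 ≤ k) (offs : List Int)
    (hoffs : ∀ o ∈ offs, 0 ≤ o ∧ o + k ≤ (r.length : Int)) :
    pvAScan (pvBuildKmers refU refRC k) (refU.length : Int) k r offs =
      pvBScan refU refRC (refU.length : Int) k r offs := by
  induction offs with
  | nil => rfl
  | cons o rest ih =>
    obtain ⟨ho0, hok⟩ := hoffs o (List.mem_cons_self ..)
    have ih' := ih (fun x hx => hoffs x (List.mem_cons_of_mem _ hx))
    have hs : ((PySem.Chars.upper (PySem.List.slice r (some o) (some (o + k)))).length : Int) = k := by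
      simp only [PySem.Chars.upper, List.length_map, PySem.List.length_slice,
        PySem.List.clampIdx]
      split_ifs <;> omega
    set s := PySem.Chars.upper (PySem.List.slice r (some o) (some (o + k))) with hsdef
    by_cases hF : PySem.Chars.find refU s < 0
    · by_cases hR : PySem.Chars.find refRC s < 0
      · -- no occurrence on either strand: both continue
        have hcont : (pvBuildKmers refU refRC k).contains s = false := by
          rw [← Bool.not_eq_true, pv_contains_build]
          push Not
          exact ⟨pv_filterF_nil refU k s hk hs hF, pv_filterR_nil refU refRC k s hk hs hR⟩
        simp only [pvAScan, pvBScan, ← hsdef, hcont]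
        simp only [Bool.false_eq_true, if_false, if_pos hF, if_pos hR]
        exact ih'
      · -- RC-strand occurrence only
        obtain ⟨t, ht⟩ := pv_filterR_head refU refRC k s hk hs hR
        have hcont : (pvBuildKmers refU refRC k).contains s = true := by
          rw [pv_contains_build]; right; rw [ht]; simp
        have hget : PySem.List.pyGetD ((pvBuildKmers refU refRC k).getD s []) 0 ((0 : Int), false)
            = ((refU.length : Int) - PySem.Chars.find refRC s - k, true) := by
          rw [pv_getD_build, pv_filterF_nil refU k s hk hs hF, ht]
          simp [PySem.List.pyGetD_zero]
        simp only [pvAScan, pvBScan, ← hsdef, hcont, hget, if_pos hF]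
        simp only [if_true, if_neg hR, ih']
    · -- forward-strand occurrence
      obtain ⟨t, ht⟩ := pv_filterF_head refU k s hk hs hF
      have hcont : (pvBuildKmers refU refRC k).contains s = true := by
        rw [pv_contains_build]; left; rw [ht]; simp
      have hget : PySem.List.pyGetD ((pvBuildKmers refU refRC k).getD s []) 0 ((0 : Int), false)
          = (PySem.Chars.find refU s, false) := by
        rw [pv_getD_build, ht]
        simp [PySem.List.pyGetD_zero]
      simp only [pvAScan, pvBScan, ← hsdef, hcont, hget, if_neg hF]
      simp only [if_true, Bool.false_eq_true, if_false, ih']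

-- ===== VERDICT (by name: the statement is the Claim_ definition above) =====
theorem find_read_start_positions_py_spec : Claim_equal_find_read_start_positions_py := by
  intro reads reference kmer_size _hdom hk
  unfold Spec_find_read_start_positions_py
  unfold find_read_start_positions_py find_read_start_positions_py_alt
  refine PySem.List.foldl_congr_mem _ _ _ _ ?_
  intro acc read _
  by_cases hlen : ((read.toList.length : Int)) < kmer_size + 20
  · simp only [if_pos hlen]
  · simp only [if_neg hlen]
    rw [pv_scan_eq _ _ _ _ hk _ (fun o ho => by
      rw [PySem.List.mem_pyRange_one] at ho
      constructor
      · exact ho.1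
      · have := ho.2; omega)]
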